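-- pv_equiv track=rewrite | github.com/jhuang59/router_benchmark | center_server/commands.py | sanitize_param_value
-- ===== SOURCE A (Python) =====
-- from typing import Optional, List
--
-- def sanitize_param_value(value: str) -> Optional[str]:
--     """
--     Sanitize a parameter value to prevent command injection
--     Returns None if value contains unsafe characters
--     """
--     # Reject shell metacharacters
--     dangerous_chars = ['`', '$', '|', ';', '&', '>', '<', '\n', '\r', '\\']
--     for char in dangerous_chars:
--         if char in value:
--             return None
--
--     # Limit length
--     if len(value) > 256:
--         return None
--
--     return value
-- ===== SOURCE B (Python) =====
-- BAD = frozenset('`$|;&><\n\r\\')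
--
-- def sanitize_param_value(value):
--     """Single pass over the string: reject on any dangerous char, then length cap."""
--     if any(c in BAD for c in value):
--         return None
--     if len(value) > 256:
--         return None
--     return value
-- ===== Notes on version B (the rewrite author's own statement) =====
-- stated objective: idiomatic
-- what changed: B makes one pass over the string testing each character against a precomputed set of dangerous characters, instead of A's loop over the ten dangerous characters each scanning the whole string.
import Mathlib
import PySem

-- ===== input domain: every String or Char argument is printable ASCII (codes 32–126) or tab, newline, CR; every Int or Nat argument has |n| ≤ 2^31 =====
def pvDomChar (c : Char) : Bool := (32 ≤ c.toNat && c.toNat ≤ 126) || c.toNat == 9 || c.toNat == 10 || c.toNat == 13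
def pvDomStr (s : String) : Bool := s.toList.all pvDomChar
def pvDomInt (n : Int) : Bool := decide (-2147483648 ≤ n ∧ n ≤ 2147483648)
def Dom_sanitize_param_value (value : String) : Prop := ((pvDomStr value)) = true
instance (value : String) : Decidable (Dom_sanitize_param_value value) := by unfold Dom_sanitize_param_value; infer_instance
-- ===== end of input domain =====

-- B replaces A's loop over the ten dangerous characters (each scanning the whole string)
-- by a single pass over the string testing set membership; objective: idiomatic.


-- ===== PORT A =====
def pvDangerousChars : List Char := ['`', '$', '|', ';', '&', '>', '<', '\n', '\r', '\\']

-- A's for-loop over dangerous_chars with an early return, as structural recursion.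
def sanitizeLoopA (value : String) : List Char → Option String
  | [] =>
    if PySem.Str.len value > 256 then none else some value
  | c :: rest =>
    if c ∈ value.toList then none else sanitizeLoopA value rest

def sanitize_param_value (value : String) : Option String :=
  sanitizeLoopA value pvDangerousChars

-- ===== PORT B =====
def pvBadSet : PySem.Set Char := PySem.Set.ofList ['`', '$', '|', ';', '&', '>', '<', '\n', '\r', '\\']

def sanitize_param_value_alt (value : String) : Option String :=
  if value.toList.any (fun c => decide (c ∈ pvBadSet)) then none
  else if PySem.Str.len value > 256 then none
  else some value

-- ===== PRECONDITION & SPEC =====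
def Spec_sanitize_param_value (value : String) (out : Option String) : Prop := out = sanitize_param_value_alt value
instance (value : String) (out : Option String) : Decidable (Spec_sanitize_param_value value out) := by unfold Spec_sanitize_param_value; infer_instance

-- ===== CLAIM (what is proved, stated in full; the proofs are below) =====
def Claim_equal_sanitize_param_value : Prop := ∀ (value : String), Dom_sanitize_param_value value → Spec_sanitize_param_value value (sanitize_param_value value)

-- ===== LEMMAS AND PROOFS =====

-- A's loop over a list of chars returns none iff some char of the list occurs in the string.
theorem sanitizeLoopA_eq (value : String) (cs : List Char) :
    sanitizeLoopA value cs =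
      (if cs.any (fun c => decide (c ∈ value.toList)) then none
       else if PySem.Str.len value > 256 then none else some value) := by
  induction cs with
  | nil => simp [sanitizeLoopA]
  | cons c rest ih =>
    by_cases h : c ∈ value.toList <;> simp [sanitizeLoopA, h, ih]

-- swapping which collection is traversed: ∃ c ∈ cs, c ∈ l  ↔  ∃ c ∈ l, c ∈ cs
theorem any_swap (cs l : List Char) :
    cs.any (fun c => decide (c ∈ l)) = l.any (fun c => decide (c ∈ cs)) := by
  apply Bool.eq_iff_iff.mpr
  simp only [List.any_eq_true, decide_eq_true_eq]
  constructor <;> rintro ⟨c, h1, h2⟩ <;> exact ⟨c, h2, h1⟩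

theorem mem_badSet_iff (c : Char) : (c ∈ pvBadSet) ↔ c ∈ pvDangerousChars := by
  simp [pvBadSet, pvDangerousChars, PySem.Set.mem_ofList]

-- ===== VERDICT (by name: the statement is the Claim_ definition above) =====
theorem sanitize_param_value_spec : Claim_equal_sanitize_param_value := by
  intro value _
  unfold Spec_sanitize_param_value sanitize_param_value sanitize_param_value_alt
  rw [sanitizeLoopA_eq]
  have : pvDangerousChars.any (fun c => decide (c ∈ value.toList))
       = value.toList.any (fun c => decide (c ∈ pvBadSet)) := by
    rw [any_swap]
    have hf : (fun c => decide (c ∈ pvDangerousChars)) = (fun c => decide (c ∈ pvBadSet)) := by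
      funext c; simp [mem_badSet_iff]
    rw [hf]
  rw [this]
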